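-- pv_equiv track=rewrite | github.com/Nickless-cmd/jarvis-v2 | apps/api/jarvis_api/services/attachment_topology_signal_tracking.py | _find_support_value
-- ===== SOURCE A (Python) =====
-- def _find_support_value(summary: str, key: str, default: str = "") -> str:
--     for part in summary.split("|"):
--         chunk = part.strip()
--         if not chunk or "=" not in chunk:
--             continue
--         left, right = chunk.split("=", 1)
--         if left.strip() == key:
--             value = right.strip()
--             return value or default
--     return default
-- ===== SOURCE B (Python) =====
-- def _find_support_value(summary: str, key: str, default: str = "") -> str:
--     parsed = {}
--     for part in summary.split("|"):
--         chunk = part.strip()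
--         if chunk and "=" in chunk:
--             left, right = chunk.split("=", 1)
--             parsed.setdefault(left.strip(), right.strip())
--     return parsed.get(key, "") or default
-- ===== Notes on version B (the rewrite author's own statement) =====
-- stated objective: alternative
-- what changed: Replaces scan-until-first-match-and-early-return with a single full parse of the summary into a first-occurrence dict (setdefault) followed by one lookup with empty-value fallback.
import Mathlib
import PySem

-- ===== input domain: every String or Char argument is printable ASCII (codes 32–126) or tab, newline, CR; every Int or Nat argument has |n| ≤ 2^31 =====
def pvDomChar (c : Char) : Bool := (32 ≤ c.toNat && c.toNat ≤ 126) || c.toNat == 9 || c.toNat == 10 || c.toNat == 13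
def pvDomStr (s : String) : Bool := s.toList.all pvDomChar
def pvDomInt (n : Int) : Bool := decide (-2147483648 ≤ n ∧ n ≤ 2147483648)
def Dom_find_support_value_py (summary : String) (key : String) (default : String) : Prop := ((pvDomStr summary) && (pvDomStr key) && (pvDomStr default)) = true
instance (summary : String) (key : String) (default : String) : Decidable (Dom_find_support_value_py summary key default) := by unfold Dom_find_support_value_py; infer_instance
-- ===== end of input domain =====

-- B replaces A's scan-until-first-match-and-early-return with a full one-pass parse into a
-- first-occurrence dict (setdefault) followed by a single lookup; alternative structure, same cost.

-- ===== PORT A =====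
-- the 'for part in summary.split("|")' loop of A, with its early return
def findSupportLoopA (key : String) (default : String) : List String → String
  | [] => default
  | part :: rest =>
    let chunk := PySem.Str.strip part
    if chunk = "" ∨ PySem.Str.isIn "=" chunk = false then
      findSupportLoopA key default rest
    else
      match PySem.Str.splitMax? chunk "=" 1 with
      | some [left, right] =>
        if PySem.Str.strip left = key then
          let value := PySem.Str.strip right
          if value = "" then default else value
        else findSupportLoopA key default rest
      | _ => findSupportLoopA key default rest   -- unreachable: "=" ∈ chunk guarantees two pieces

def find_support_value_py (summary : String) (key : String) (default : String) : String :=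
  findSupportLoopA key default (((PySem.Str.split? summary "|").getD []))

-- ===== PORT B =====
-- B's loop: build the dict of first occurrences with setdefault
def parseSupportB : List String → PySem.Dict String String → PySem.Dict String String
  | [], d => d
  | part :: rest, d =>
    let chunk := PySem.Str.strip part
    let d' :=
      if chunk ≠ "" ∧ PySem.Str.isIn "=" chunk = true then
        match PySem.Str.splitMax? chunk "=" 1 with
        | some [left, right] => d.setdefault (PySem.Str.strip left) (PySem.Str.strip right)
        | _ => d   -- unreachable: "=" ∈ chunk guarantees two pieces
      else d
    parseSupportB rest d'

def find_support_value_py_alt (summary : String) (key : String) (default : String) : String :=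
  let parsed := parseSupportB (((PySem.Str.split? summary "|").getD [])) PySem.Dict.empty
  let v := parsed.getD key ""
  if v = "" then default else v

-- ===== PRECONDITION & SPEC =====
def Spec_find_support_value_py (summary : String) (key : String) (default : String) (out : String) : Prop := out = find_support_value_py_alt summary key default
instance (summary : String) (key : String) (default : String) (out : String) : Decidable (Spec_find_support_value_py summary key default out) := by unfold Spec_find_support_value_py; infer_instance

-- ===== CLAIM (what is proved, stated in full; the proofs are below) =====
def Claim_equal_find_support_value_py : Prop := ∀ (summary : String) (key : String) (default : String), Dom_find_support_value_py summary key default → Spec_find_support_value_py summary key default (find_support_value_py summary key default)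

-- ===== LEMMAS AND PROOFS =====

-- once the key is present, B's remaining setdefault loop never changes its value
theorem parseSupportB_get?_of_contains (l : List String) (d : PySem.Dict String String)
    (key : String) (h : d.contains key = true) :
    (parseSupportB l d).get? key = d.get? key ∧ (parseSupportB l d).contains key = true := by
  induction l generalizing d with
  | nil => exact ⟨rfl, h⟩
  | cons part rest ih =>
    simp only [parseSupportB]
    split_ifs with hc
    · cases hsp : PySem.Str.splitMax? (PySem.Str.strip part) "=" 1 with
      | none => exact ih d h
      | some pieces =>
        match pieces with
        | [] => exact ih d h
        | [x] => exact ih d h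
        | [left, right] =>
          simp only []
          have hcont : (d.setdefault (PySem.Str.strip left) (PySem.Str.strip right)).contains key = true := by
            rw [PySem.Dict.contains_setdefault]
            simp [h]
          have hget : (d.setdefault (PySem.Str.strip left) (PySem.Str.strip right)).get? key = d.get? key := by
            by_cases hk : key = PySem.Str.strip left
            · subst hk
              rw [PySem.Dict.setdefault_of_contains _ _ h]
            · exact PySem.Dict.get?_setdefault_of_ne _ _ hk
          obtain ⟨a, b⟩ := ih _ hcont
          exact ⟨a.trans hget, b⟩
        | _ :: _ :: _ :: _ => exact ih d h
    · exact ih d h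

-- main invariant: while the key is absent from the dict, A's scan equals B's parse-then-lookup
theorem loop_invariant (l : List String) (key default : String) (d : PySem.Dict String String)
    (h : d.contains key = false) :
    findSupportLoopA key default l =
      (if (parseSupportB l d).getD key "" = "" then default
       else (parseSupportB l d).getD key "") := by
  induction l generalizing d with
  | nil =>
    simp only [findSupportLoopA, parseSupportB]
    rw [PySem.Dict.getD_of_not_contains _ _ h]
    simp
  | cons part rest ih =>
    simp only [findSupportLoopA, parseSupportB]
    by_cases hc : PySem.Str.strip part ≠ "" ∧ PySem.Str.isIn "=" (PySem.Str.strip part) = true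
    · have hns : ¬ (PySem.Str.strip part = "" ∨ PySem.Str.isIn "=" (PySem.Str.strip part) = false) := by
        rintro (h1 | h1)
        · exact hc.1 h1
        · rw [hc.2] at h1; cases h1
      rw [if_neg hns, if_pos hc]
      cases hsp : PySem.Str.splitMax? (PySem.Str.strip part) "=" 1 with
      | none => exact ih d h
      | some pieces =>
        match pieces with
        | [] => exact ih d h
        | [x] => exact ih d h
        | [left, right] =>
          simp only []
          by_cases hk : PySem.Str.strip left = key
          · subst hk
            rw [if_pos rfl, PySem.Dict.setdefault_of_not_contains _ _ h]
            have hcont := PySem.Dict.contains_insert_self d (PySem.Str.strip left) (PySem.Str.strip right)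
            obtain ⟨hget, _⟩ := parseSupportB_get?_of_contains rest _ _ hcont
            have hv : (parseSupportB rest (d.insert (PySem.Str.strip left) (PySem.Str.strip right))).getD (PySem.Str.strip left) "" = PySem.Str.strip right := by
              rw [PySem.Dict.getD_eq_get?_getD, hget, PySem.Dict.get?_insert_self]
              rfl
            rw [hv]
          · rw [if_neg hk]
            have hc' : (d.setdefault (PySem.Str.strip left) (PySem.Str.strip right)).contains key = false := by
              rw [PySem.Dict.contains_setdefault]
              simp [h, Ne.symm hk]
            exact ih _ hc'
        | _ :: _ :: _ :: _ => exact ih d h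
    · have hskip : PySem.Str.strip part = "" ∨ PySem.Str.isIn "=" (PySem.Str.strip part) = false := by
        by_cases h1 : PySem.Str.strip part = ""
        · exact Or.inl h1
        · rcases Bool.eq_false_or_eq_true (PySem.Str.isIn "=" (PySem.Str.strip part)) with h2 | h2
          · exact absurd ⟨h1, h2⟩ hc
          · exact Or.inr h2
      rw [if_pos hskip, if_neg hc]
      exact ih d h

-- ===== VERDICT (by name: the statement is the Claim_ definition above) =====
theorem find_support_value_py_spec : Claim_equal_find_support_value_py := by
  intro summary key default _
  unfold Spec_find_support_value_py find_support_value_py find_support_value_py_alt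
  exact loop_invariant _ key default PySem.Dict.empty (PySem.Dict.contains_empty key)
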